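-- pv_equiv track=rewrite | github.com/yannickloth/W33-Theory | legacy/one_off_root/_explore31a.py | mobius
-- ===== SOURCE A (Python) =====
-- import math
--
-- def mobius(n):
--     if n == 1:
--         return 1
--     # Factor
--     factors = []
--     temp = n
--     for p in range(2, int(math.sqrt(n)) + 2):
--         if temp % p == 0:
--             count = 0
--             while temp % p == 0:
--                 temp //= p
--                 count += 1
--             if count > 1:
--                 return 0
--             factors.append(p)
--     if temp > 1:
--         factors.append(temp)
--     return (-1)**len(factors)
--
-- p = 1
-- ===== SOURCE B (Python) =====
-- import math
--
-- def mobius(n):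
--     if n == 1:
--         return 1
--     p = _smallest_factor(n)
--     rest = n // p
--     if rest % p == 0:
--         return 0
--     return -mobius(rest)
--
-- def _smallest_factor(n):
--     for p in range(2, math.isqrt(n) + 1):
--         if n % p == 0:
--             return p
--     return n
-- ===== Notes on version B (the rewrite author's own statement) =====
-- stated objective: alternative
-- what changed: B discards A's single scan-and-divide loop with its factor list and per-prime while/counter: it recurses instead, peeling off the smallest factor p of n each step, returning 0 as soon as p divides the cofactor twice and otherwise negating the Moebius value of the cofactor n//p; no factor list, no exponent counting, sign accumulated by negation along the recursion.
-- outside the precondition, e.g. on mobius(0): A returns 1, B raises ZeroDivisionError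
import Mathlib
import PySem

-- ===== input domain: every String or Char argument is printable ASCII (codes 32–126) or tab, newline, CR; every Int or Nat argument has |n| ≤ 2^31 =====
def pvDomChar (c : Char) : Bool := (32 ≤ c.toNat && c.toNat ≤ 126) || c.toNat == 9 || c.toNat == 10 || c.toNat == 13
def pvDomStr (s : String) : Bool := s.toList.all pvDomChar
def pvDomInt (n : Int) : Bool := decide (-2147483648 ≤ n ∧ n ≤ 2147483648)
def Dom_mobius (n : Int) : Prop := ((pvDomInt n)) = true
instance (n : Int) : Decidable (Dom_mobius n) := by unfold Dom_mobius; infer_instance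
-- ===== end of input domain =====

-- B replaces A's scan-and-divide loop (factor list, per-prime while/counter, (-1)**len) by a
-- recursion that peels off the smallest factor each step and negates the cofactor's value
-- (objective: alternative algorithmic decomposition; same asymptotic cost).
-- int(math.sqrt(n)) / math.isqrt(n) are ported as Int.sqrt: exact on the stated |n| ≤ 2^31 domain.

-- ===== PORT A =====
-- A's inner while loop: divide p out of temp, counting.  The guard adds 2 ≤ p ∧ 1 ≤ temp
-- (always true in A's executions on Pre_) for termination.
def pyDivOutA (p temp count : Int) : Int × Int :=
  if h : 2 ≤ p ∧ 1 ≤ temp ∧ PySem.Int.mod temp p = 0 then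
    pyDivOutA p (PySem.Int.floordiv temp p) (count + 1)
  else (temp, count)
termination_by temp.toNat
decreasing_by
  obtain ⟨k, hk⟩ : p ∣ temp := (PySem.Int.mod_eq_zero_iff_dvd temp p).mp h.2.2
  rw [PySem.Int.floordiv_eq_ediv_of_pos (by omega : (0:Int) < p)]
  have hk' : temp / p = k := by rw [hk, Int.mul_ediv_cancel_left _ (by omega : p ≠ 0)]
  have hk1 : 1 ≤ k := by nlinarith [h.1, h.2.1]
  have hlt : k < temp := by nlinarith [h.1, h.2.1]
  omega

-- A's for-loop over the range, with the early 'return 0' encoded as the value 0.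
def mobiusGoA : List Int → Int → List Int → Int
  | [], temp, factors =>
      if temp > 1 then (-1 : Int) ^ (factors ++ [temp]).length
      else (-1 : Int) ^ factors.length
  | p :: ps, temp, factors =>
      if PySem.Int.mod temp p = 0 then
        let r := pyDivOutA p temp 0
        if r.2 > 1 then 0 else mobiusGoA ps r.1 (factors ++ [p])
      else mobiusGoA ps temp factors

def mobius (n : Int) : Int :=
  if n = 1 then 1
  else mobiusGoA (PySem.List.pyRange 2 (Int.sqrt n + 2) 1) n []

-- ===== PORT B =====
-- _smallest_factor's for-loop: first p in the range dividing n, else n itself.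
def findFactorB : List Int → Int → Int
  | [], n => n
  | p :: ps, n => if PySem.Int.mod n p = 0 then p else findFactorB ps n

def smallestFactorB (n : Int) : Int :=
  findFactorB (PySem.List.pyRange 2 (Int.sqrt n + 1) 1) n

-- Needed by mobius_alt's termination proof (cited in decreasing_by).
theorem findFactorB_spec (ps : List Int) (n : Int) (hn : 2 ≤ n)
    (hps : ∀ p ∈ ps, 2 ≤ p) : 2 ≤ findFactorB ps n ∧ findFactorB ps n ∣ n := by
  induction ps with
  | nil => exact ⟨hn, dvd_refl n⟩
  | cons p ps ih =>
    by_cases hm : PySem.Int.mod n p = 0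
    · simp only [findFactorB, hm, if_true]
      exact ⟨hps p (List.mem_cons_self ..), (PySem.Int.mod_eq_zero_iff_dvd n p).mp hm⟩
    · simp only [findFactorB, hm, if_false]
      exact ih (fun q hq => hps q (List.mem_cons_of_mem _ hq))

theorem smallestFactorB_spec (n : Int) (hn : 2 ≤ n) :
    2 ≤ smallestFactorB n ∧ smallestFactorB n ∣ n :=
  findFactorB_spec _ n hn (fun p hp => ((PySem.List.mem_pyRange_one).mp hp).1)

def mobius_alt (n : Int) : Int :=
  if n = 1 then 1
  else if h2 : 2 ≤ n then
    let p := smallestFactorB n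
    let rest := PySem.Int.floordiv n p
    if PySem.Int.mod rest p = 0 then 0 else -mobius_alt rest
  else 0  -- unreachable inside Pre_: the Python raises (ValueError / ZeroDivisionError) for n ≤ 0
termination_by n.toNat
decreasing_by
  obtain ⟨hp2, hpd⟩ := smallestFactorB_spec n h2
  set q := smallestFactorB n with hq
  obtain ⟨k, hk⟩ := hpd
  have hk1 : 1 ≤ k := by nlinarith
  have hlt : k < n := by nlinarith
  have hdv : PySem.Int.floordiv n q = k := by
    rw [PySem.Int.floordiv_eq_ediv_of_pos (by omega : (0:Int) < q), hk,
      Int.mul_ediv_cancel_left _ (by omega : q ≠ 0)]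
  rw [hdv]
  omega

-- ===== PRECONDITION & SPEC =====
-- Pre_ excludes the negative inputs, where A raises ValueError (math.sqrt), and n = 0, where A's
-- returned value is an accidental artefact of its empty loop and B's natural recursion raises
-- ZeroDivisionError (see the cite in claim.json).
def Pre_mobius (n : Int) : Prop := 1 ≤ n
instance (n : Int) : Decidable (Pre_mobius n) := by unfold Pre_mobius; infer_instance
def pvWitness_mobius : Int := 12

def Spec_mobius (n : Int) (out : Int) : Prop := out = mobius_alt n
instance (n : Int) (out : Int) : Decidable (Spec_mobius n out) := by unfold Spec_mobius; infer_instance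

-- ===== CLAIM (what is proved, stated in full; the proofs are below) =====
def Claim_equal_mobius : Prop := ∀ (n : Int), Dom_mobius n → Pre_mobius n → Spec_mobius n (mobius n)

-- ===== LEMMAS AND PROOFS =====

-- Reference value: the Moebius function of a positive natural number.
def muN (m : Nat) : Int :=
  if Squarefree m then (-1 : Int) ^ m.primeFactorsList.length else 0

theorem muN_one : muN 1 = 1 := by
  simp [muN, Nat.primeFactorsList_one]

theorem muN_prime {p : Nat} (hp : p.Prime) : muN p = -1 := by
  simp [muN, hp.squarefree, Nat.primeFactorsList_prime hp]

theorem muN_sq {p m : Nat} (hp : p.Prime) (h : p * p ∣ m) : muN m = 0 := by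
  have : ¬ Squarefree m := fun hs => hp.prime.not_unit (hs p h)
  simp [muN, this]

theorem muN_prime_mul {p m : Nat} (hp : p.Prime) (hm : m ≠ 0) (hnd : ¬ p ∣ m) :
    muN (p * m) = - muN m := by
  have hcop : p.Coprime m := (Nat.Prime.coprime_iff_not_dvd hp).mpr hnd
  have hlen : (p * m).primeFactorsList.length = m.primeFactorsList.length + 1 := by
    have := (Nat.perm_primeFactorsList_mul hp.ne_zero hm).length_eq
    simp only [List.length_append, Nat.primeFactorsList_prime hp,
      List.length_singleton] at this
    omega
  unfold muN
  by_cases hs : Squarefree m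
  · rw [if_pos ((Nat.squarefree_mul hcop).mpr ⟨hp.squarefree, hs⟩), if_pos hs, hlen, pow_succ]
    ring
  · rw [if_neg (fun h => hs ((Nat.squarefree_mul hcop).mp h).2), if_neg hs, neg_zero]

-- m is prime if it divides t and every prime factor of t is ≥ m.
theorem prime_of_min_divisor (m t : Nat) (h2 : 2 ≤ m) (hd : m ∣ t)
    (hmin : ∀ q : Nat, q.Prime → q ∣ t → m ≤ q) : m.Prime := by
  have hq := Nat.minFac_prime (show m ≠ 1 by omega)
  have h1 : m.minFac ≤ m := Nat.minFac_le (by omega)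
  have h2' : m ≤ m.minFac := hmin _ hq ((Nat.minFac_dvd m).trans hd)
  have he : m.minFac = m := le_antisymm h1 h2'
  rwa [← he]

-- t is prime if 2 ≤ t < c² and every prime factor of t is ≥ c.
theorem prime_of_large_factors (t c : Nat) (h2 : 2 ≤ t) (hlt : t < c * c)
    (hmin : ∀ q : Nat, q.Prime → q ∣ t → c ≤ q) : t.Prime := by
  by_contra hnp
  have hsq := Nat.minFac_sq_le_self (show 0 < t by omega) hnp
  have hq := Nat.minFac_prime (show t ≠ 1 by omega)
  have hc := hmin _ hq (Nat.minFac_dvd t)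
  have : c * c ≤ t.minFac * t.minFac := Nat.mul_le_mul hc hc
  rw [pow_two] at hsq
  omega

-- Cast helpers between Int divisibility on nonnegatives and Nat divisibility.
theorem dvd_toNat_iff {a b : Int} (ha : 0 ≤ a) (hb : 0 ≤ b) :
    a.toNat ∣ b.toNat ↔ a ∣ b := by
  rw [← Int.natCast_dvd_natCast, Int.toNat_of_nonneg ha, Int.toNat_of_nonneg hb]

theorem natCast_dvd_iff {q : Nat} {b : Int} (hb : 0 ≤ b) :
    (q : Int) ∣ b ↔ q ∣ b.toNat := by
  rw [← Int.natCast_dvd_natCast, Int.toNat_of_nonneg hb]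

-- === A's while loop: characterization ===

theorem divOutA_step (p temp c : Int) (h : 2 ≤ p ∧ 1 ≤ temp ∧ PySem.Int.mod temp p = 0) :
    pyDivOutA p temp c = pyDivOutA p (PySem.Int.floordiv temp p) (c + 1) := by
  rw [pyDivOutA, dif_pos h]

theorem divOutA_stop (p temp c : Int) (h : ¬ (2 ≤ p ∧ 1 ≤ temp ∧ PySem.Int.mod temp p = 0)) :
    pyDivOutA p temp c = (temp, c) := by
  rw [pyDivOutA, dif_neg h]

theorem divOut_dec (p temp : Int) (h : 2 ≤ p ∧ 1 ≤ temp ∧ PySem.Int.mod temp p = 0) :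
    (PySem.Int.floordiv temp p).toNat < temp.toNat ∧ 1 ≤ PySem.Int.floordiv temp p ∧
      temp = p * PySem.Int.floordiv temp p := by
  obtain ⟨hp, ht, hm⟩ := h
  obtain ⟨k, hk⟩ : p ∣ temp := (PySem.Int.mod_eq_zero_iff_dvd temp p).mp hm
  rw [PySem.Int.floordiv_eq_ediv_of_pos (by omega : (0:Int) < p)]
  have hk' : temp / p = k := by rw [hk, Int.mul_ediv_cancel_left _ (by omega : p ≠ 0)]
  have hk1 : 1 ≤ k := by nlinarith
  have hlt : k < temp := by nlinarith
  exact ⟨by omega, by omega, by rw [hk', hk]⟩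

theorem divOutA_shift (p temp c : Int) :
    pyDivOutA p temp c = ((pyDivOutA p temp 0).1, c + (pyDivOutA p temp 0).2) := by
  suffices H : ∀ (n : Nat) (t c' : Int), t.toNat = n →
      pyDivOutA p t c' = ((pyDivOutA p t 0).1, c' + (pyDivOutA p t 0).2) from H _ temp c rfl
  intro n
  induction n using Nat.strong_induction_on with
  | _ n ih =>
    intro t c' hn
    by_cases h : 2 ≤ p ∧ 1 ≤ t ∧ PySem.Int.mod t p = 0
    · have hd := divOut_dec p t h
      rw [divOutA_step p t c' h, divOutA_step p t 0 h,
          ih _ (hn ▸ hd.1) _ (c' + 1) rfl, ih _ (hn ▸ hd.1) _ (0 + 1) rfl]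
      rw [Prod.mk.injEq]
      exact ⟨rfl, by ring⟩
    · rw [divOutA_stop p t c' h, divOutA_stop p t 0 h]
      rw [Prod.mk.injEq]
      exact ⟨rfl, by ring⟩

-- Full characterization: temp = p^count * rest, p ∤ rest, rest ≥ 1, count ≥ 1 if p ∣ temp.
theorem divOutA_props (p temp : Int) (hp : 2 ≤ p) (ht : 1 ≤ temp) :
    temp = p ^ (pyDivOutA p temp 0).2.toNat * (pyDivOutA p temp 0).1 ∧
      1 ≤ (pyDivOutA p temp 0).1 ∧ ¬ p ∣ (pyDivOutA p temp 0).1 ∧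
      0 ≤ (pyDivOutA p temp 0).2 ∧
      (p ∣ temp → 1 ≤ (pyDivOutA p temp 0).2) := by
  suffices H : ∀ (n : Nat) (t : Int), t.toNat = n → 1 ≤ t →
      t = p ^ (pyDivOutA p t 0).2.toNat * (pyDivOutA p t 0).1 ∧
        1 ≤ (pyDivOutA p t 0).1 ∧ ¬ p ∣ (pyDivOutA p t 0).1 ∧
        0 ≤ (pyDivOutA p t 0).2 ∧ (p ∣ t → 1 ≤ (pyDivOutA p t 0).2) from H _ temp rfl ht
  intro n
  induction n using Nat.strong_induction_on with
  | _ n ih =>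
    intro t hn ht1
    by_cases h : 2 ≤ p ∧ 1 ≤ t ∧ PySem.Int.mod t p = 0
    · have hd := divOut_dec p t h
      obtain ⟨h1, h2, h3, h4, _⟩ := ih _ (hn ▸ hd.1) _ rfl hd.2.1
      rw [divOutA_step p t 0 h, divOutA_shift]
      refine ⟨?_, h2, h3, by omega, fun _ => by omega⟩
      have hpow : ((0:Int) + 1 + (pyDivOutA p (PySem.Int.floordiv t p) 0).2).toNat
          = (pyDivOutA p (PySem.Int.floordiv t p) 0).2.toNat + 1 := by omega
      rw [hpow, pow_succ]
      calc t = p * PySem.Int.floordiv t p := hd.2.2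
        _ = p * (p ^ (pyDivOutA p (PySem.Int.floordiv t p) 0).2.toNat
            * (pyDivOutA p (PySem.Int.floordiv t p) 0).1) := by rw [← h1]
        _ = _ := by ring
    · rw [divOutA_stop p t 0 h]
      have hnd : ¬ p ∣ t := fun hdvd =>
        h ⟨hp, ht1, (PySem.Int.mod_eq_zero_iff_dvd t p).mpr hdvd⟩
      exact ⟨by simp, ht1, hnd, le_refl 0, fun hdvd => absurd hdvd hnd⟩

-- === A's main loop computes (-1)^|factors| * μ(temp) ===

theorem goA_mu (b : Int) (hb : 0 ≤ b) : ∀ (m : Nat) (p0 temp : Int) (factors : List Int),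
    (b - p0).toNat = m → 2 ≤ p0 → 1 ≤ temp → temp < b * b →
    (∀ q : Nat, q.Prime → (q : Int) ∣ temp → p0 ≤ (q : Int)) →
    mobiusGoA (PySem.List.pyRange p0 b 1) temp factors
      = (-1 : Int) ^ factors.length * muN temp.toNat := by
  intro m
  induction m using Nat.strong_induction_on with
  | _ m ih =>
    intro p0 temp factors hm h2 ht hbb hmin
    by_cases hpb : p0 < b
    · -- cons case
      rw [PySem.List.pyRange_one_cons hpb]
      by_cases hdvd : PySem.Int.mod temp p0 = 0
      · have hpd : p0 ∣ temp := (PySem.Int.mod_eq_zero_iff_dvd temp p0).mp hdvd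
        -- p0 is prime
        have hp0prime : p0.toNat.Prime := by
          apply prime_of_min_divisor p0.toNat temp.toNat (by omega)
            ((dvd_toNat_iff (by omega) (by omega)).mpr hpd)
          intro q hq hqd
          have := hmin q hq ((natCast_dvd_iff (by omega)).mpr hqd)
          omega
        obtain ⟨heq, hr1, hnr, hc0, hc1⟩ := divOutA_props p0 temp (by omega) ht
        have hc1' := hc1 hpd
        simp only [mobiusGoA, hdvd, if_true]
        by_cases hcgt : (pyDivOutA p0 temp 0).2 > 1
        · -- count > 1: A returns 0; p0² divides temp, so μ(temp) = 0
          simp only [hcgt, if_true]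
          have hsq : (p0 * p0) ∣ temp := by
            rw [heq]
            have h2n : 2 ≤ (pyDivOutA p0 temp 0).2.toNat := by omega
            exact Dvd.dvd.mul_right
              (by calc p0 * p0 = p0 ^ 2 := by ring
                _ ∣ p0 ^ (pyDivOutA p0 temp 0).2.toNat := pow_dvd_pow p0 h2n) _
          have : muN temp.toNat = 0 := by
            apply muN_sq hp0prime
            have : (p0.toNat * p0.toNat : Int) ∣ temp := by
              push_cast [Int.toNat_of_nonneg (show (0:Int) ≤ p0 by omega)]
              exact hsq
            rw [← natCast_dvd_iff (show (0:Int) ≤ temp by omega)] at *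
            exact_mod_cast this
          rw [this, mul_zero]
        · -- count = 1: temp = p0 * rest with p0 ∤ rest
          have hc1'' : (pyDivOutA p0 temp 0).2 = 1 := by omega
          simp only [hcgt, if_false]
          set rest := (pyDivOutA p0 temp 0).1 with hrest
          have heq' : temp = p0 * rest := by
            rw [heq, hc1'']; norm_num
          have hrle : rest ≤ temp := by nlinarith
          have hrec := ih (b - (p0+1)).toNat (by omega) (p0+1) rest (factors ++ [p0]) rfl
            (by omega) hr1 (by omega)
            (by
              intro q hq hqd
              have hq1 : (q : Int) ∣ temp := hqd.trans ⟨p0, by rw [heq']; ring⟩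
              have := hmin q hq hq1
              have : (q : Int) ≠ p0 := by
                intro hqe
                exact hnr (hqe ▸ hqd)
              omega)
          rw [hrec, List.length_append]
          -- μ(temp) = -μ(rest)
          have htn : temp.toNat = p0.toNat * rest.toNat := by
            have hcast : ((p0.toNat * rest.toNat : Nat) : Int) = temp := by
              push_cast [Int.toNat_of_nonneg (show (0:Int) ≤ p0 by omega),
                Int.toNat_of_nonneg (show (0:Int) ≤ rest by omega)]
              exact heq'.symm
            omega
          have hmu : muN temp.toNat = - muN rest.toNat := by
            rw [htn]
            exact muN_prime_mul hp0prime (by omega)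
              (fun hdd => hnr ((dvd_toNat_iff (by omega) (by omega)).mp hdd))
          rw [hmu, List.length_singleton, pow_succ]
          ring
      · -- p0 does not divide temp
        simp only [mobiusGoA, hdvd, if_false]
        apply ih (b - (p0+1)).toNat (by omega) (p0+1) temp factors rfl (by omega) ht hbb
        intro q hq hqd
        have := hmin q hq hqd
        have : (q : Int) ≠ p0 := by
          intro hqe
          exact hdvd ((PySem.Int.mod_eq_zero_iff_dvd temp p0).mpr (hqe ▸ hqd))
        omega
    · -- nil case: range exhausted
      rw [PySem.List.pyRange_one_eq_nil (by omega)]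
      by_cases ht1 : temp > 1
      · have hprime : temp.toNat.Prime := by
          apply prime_of_large_factors temp.toNat p0.toNat (by omega)
          · have hle : b * b ≤ p0 * p0 := Int.mul_le_mul (by omega) (by omega) hb (by omega)
            have hcast : ((p0.toNat * p0.toNat : Nat) : Int) = p0 * p0 := by
              push_cast [Int.toNat_of_nonneg (show (0:Int) ≤ p0 by omega)]
              ring
            omega
          · intro q hq hqd
            have := hmin q hq ((natCast_dvd_iff (by omega)).mpr hqd)
            omega
        simp only [mobiusGoA, ht1, if_true, List.length_append, List.length_singleton]
        rw [muN_prime hprime, pow_succ]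
      · have ht1' : temp = 1 := by omega
        simp only [mobiusGoA, ht1, if_false]
        rw [ht1']
        simp [muN_one]

theorem mobiusA_mu (n : Int) (hn : 1 ≤ n) : mobius n = muN n.toNat := by
  by_cases h1 : n = 1
  · subst h1; simp [mobius, muN_one]
  · have h2 : 2 ≤ n := by omega
    rw [mobius, if_neg h1]
    have hsq : n < (Int.sqrt n + 2) * (Int.sqrt n + 2) := by
      have h' := Nat.lt_succ_sqrt n.toNat
      have hcast : ((Nat.sqrt n.toNat : Int) + 2) * ((Nat.sqrt n.toNat : Int) + 2)
          = ((Nat.sqrt n.toNat + 2) * (Nat.sqrt n.toNat + 2) : Nat) := by push_cast; ring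
      rw [Int.sqrt, hcast]
      have : n.toNat < (Nat.sqrt n.toNat + 2) * (Nat.sqrt n.toNat + 2) := by nlinarith
      omega
    have := goA_mu (Int.sqrt n + 2)
      (by have : (0:Int) ≤ Int.sqrt n := by rw [Int.sqrt]; positivity
          omega)
      (Int.sqrt n + 2 - 2).toNat 2 n [] rfl (by omega) (by omega) hsq
      (by intro q hq _; exact_mod_cast hq.two_le)
    simpa using this

-- === B: smallestFactorB computes minFac ===

theorem findFactor_minFac (n : Int) (hn : 2 ≤ n) : ∀ (m : Nat) (p0 : Int),
    (Int.sqrt n + 1 - p0).toNat = m → 2 ≤ p0 →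
    (∀ q : Int, 2 ≤ q → q < p0 → ¬ q ∣ n) →
    findFactorB (PySem.List.pyRange p0 (Int.sqrt n + 1) 1) n = (n.toNat.minFac : Int) := by
  intro m
  induction m using Nat.strong_induction_on with
  | _ m ih =>
    intro p0 hm h2 hnd
    by_cases hpb : p0 < Int.sqrt n + 1
    · rw [PySem.List.pyRange_one_cons hpb]
      by_cases hdv : PySem.Int.mod n p0 = 0
      · simp only [findFactorB, hdv, if_true]
        have hpd : p0 ∣ n := (PySem.Int.mod_eq_zero_iff_dvd n p0).mp hdv
        have hle : n.toNat.minFac ≤ p0.toNat :=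
          Nat.minFac_le_of_dvd (by omega) ((dvd_toNat_iff (by omega) (by omega)).mpr hpd)
        have hge : p0.toNat ≤ n.toNat.minFac := by
          by_contra hlt
          have hdmf : (n.toNat.minFac : Int) ∣ n :=
            (natCast_dvd_iff (by omega)).mpr (Nat.minFac_dvd _)
          have h2mf := (Nat.minFac_prime (show n.toNat ≠ 1 by omega)).two_le
          exact hnd (n.toNat.minFac : Int) (by exact_mod_cast h2mf) (by omega) hdmf
        have : n.toNat.minFac = p0.toNat := le_antisymm hle hge
        rw [this]; omega
      · simp only [findFactorB, hdv, if_false]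
        apply ih (Int.sqrt n + 1 - (p0 + 1)).toNat (by omega) (p0 + 1) rfl (by omega)
        intro q hq2 hqlt hqd
        by_cases hqe : q = p0
        · exact hdv ((PySem.Int.mod_eq_zero_iff_dvd n p0).mpr (hqe ▸ hqd))
        · exact hnd q hq2 (by omega) hqd
    · rw [PySem.List.pyRange_one_eq_nil (by omega)]
      -- no divisor in [2, sqrt n]: n is prime, so minFac n = n
      have hprime : n.toNat.Prime := by
        by_contra hnp
        have hsq := Nat.minFac_sq_le_self (show 0 < n.toNat by omega) hnp
        have hq := Nat.minFac_prime (show n.toNat ≠ 1 by omega)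
        have hle : n.toNat.minFac ≤ Nat.sqrt n.toNat := by
          rw [Nat.le_sqrt]; rw [pow_two] at hsq; exact hsq
        have hd : (n.toNat.minFac : Int) ∣ n := (natCast_dvd_iff (by omega)).mpr (Nat.minFac_dvd _)
        apply hnd (n.toNat.minFac : Int) (by exact_mod_cast hq.two_le) _ hd
        have : (Int.sqrt n : Int) = (Nat.sqrt n.toNat : Int) := by rw [Int.sqrt]
        omega
      rw [hprime.minFac_eq, findFactorB]
      omega

theorem smallestFactorB_minFac (n : Int) (hn : 2 ≤ n) :
    smallestFactorB n = (n.toNat.minFac : Int) := by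
  rw [smallestFactorB]
  exact findFactor_minFac n hn _ 2 rfl (by omega) (fun q hq2 hqlt _ => by omega)

-- === B computes μ ===

theorem mobiusB_mu_aux : ∀ (m : Nat) (n : Int), n.toNat = m → 1 ≤ n →
    mobius_alt n = muN n.toNat := by
  intro m
  induction m using Nat.strong_induction_on with
  | _ m ih =>
    intro n hi hn
    by_cases h1 : n = 1
    · subst h1; simp [mobius_alt, muN_one]
    · have h2 : 2 ≤ n := by omega
      obtain ⟨hp2, hpd⟩ := smallestFactorB_spec n h2
      set p := smallestFactorB n with hpdef
      have hpmf : p = (n.toNat.minFac : Int) := smallestFactorB_minFac n h2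
      have hprime : n.toNat.minFac.Prime := Nat.minFac_prime (show n.toNat ≠ 1 by omega)
      obtain ⟨k, hk⟩ := hpd
      have hk1 : 1 ≤ k := by nlinarith
      have hklt : k < n := by nlinarith
      have hrest : PySem.Int.floordiv n p = k := by
        rw [PySem.Int.floordiv_eq_ediv_of_pos (by omega : (0:Int) < p), hk,
          Int.mul_ediv_cancel_left _ (by omega : p ≠ 0)]
      rw [mobius_alt, if_neg h1, dif_pos h2]
      show (if PySem.Int.mod (PySem.Int.floordiv n p) p = 0 then 0
            else -mobius_alt (PySem.Int.floordiv n p)) = muN n.toNat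
      rw [hrest]
      have hntn : n.toNat = p.toNat * k.toNat := by
        have : ((p.toNat * k.toNat : Nat) : Int) = n := by
          push_cast [Int.toNat_of_nonneg (show (0:Int) ≤ p by omega),
            Int.toNat_of_nonneg (show (0:Int) ≤ k by omega)]
          omega
        omega
      by_cases hmod : PySem.Int.mod k p = 0
      · rw [if_pos hmod]
        have hpk : p ∣ k := (PySem.Int.mod_eq_zero_iff_dvd k p).mp hmod
        have hsq : (p.toNat * p.toNat) ∣ n.toNat := by
          obtain ⟨j, hj⟩ := hpk
          have : ((p.toNat * p.toNat : Nat) : Int) ∣ ((n.toNat : Nat) : Int) := by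
            push_cast [Int.toNat_of_nonneg (show (0:Int) ≤ p by omega),
              Int.toNat_of_nonneg (show (0:Int) ≤ n by omega)]
            exact ⟨j, by rw [hk, hj]; ring⟩
          exact_mod_cast this
        have hptn : p.toNat = n.toNat.minFac := by omega
        rw [muN_sq (hptn ▸ hprime) hsq]
      · rw [if_neg hmod]
        have hnpk : ¬ p ∣ k := fun hd => hmod ((PySem.Int.mod_eq_zero_iff_dvd k p).mpr hd)
        have hrec := ih k.toNat (by omega) k rfl hk1
        rw [hrec]
        have hptn : p.toNat = n.toNat.minFac := by omega
        have hmu : muN n.toNat = - muN k.toNat := by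
          rw [hntn, hptn]
          exact muN_prime_mul hprime (by omega)
            (fun hdd => hnpk (by
              rw [hpmf]
              exact (natCast_dvd_iff (show (0:Int) ≤ k by omega)).mpr hdd))
        rw [hmu]

theorem mobiusB_mu (n : Int) (hn : 1 ≤ n) : mobius_alt n = muN n.toNat :=
  mobiusB_mu_aux n.toNat n rfl hn

-- ===== VERDICT (by name: the statement is the Claim_ definition above) =====
theorem mobius_spec : Claim_equal_mobius := by
  intro n _ hpre
  unfold Spec_mobius
  rw [mobiusA_mu n hpre, mobiusB_mu n hpre]
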